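-- pv_equiv track=rewrite | github.com/broken-byte/general_interview_prep | problems/algorithm_problems/pyramid_transition_matrix/brute_force.py | create_allowed_to_char_hash
-- ===== SOURCE A (Python) =====
-- def create_allowed_to_char_hash(allowed: list[str]) -> dict[str: list[str]]:
--     allowed_to_first_char_hash: dict[str: list[str]] = {}
--     for triple in allowed:
--         first_letter = triple[0]
--         if first_letter in allowed_to_first_char_hash:
--             allowed_to_first_char_hash[first_letter].append(triple)
--         else:
--             allowed_to_first_char_hash[first_letter] = [triple]
--     return allowed_to_first_char_hash
-- ===== SOURCE B (Python) =====
-- def create_allowed_to_char_hash(allowed: list[str]) -> dict: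
--     keys = dict.fromkeys(t[0] for t in allowed)
--     return {k: [t for t in allowed if t[0] == k] for k in keys}
-- ===== Notes on version B (the rewrite author's own statement) =====
-- stated objective: alternative
-- what changed: B replaces A's single hash-insertion grouping loop with a two-pass scheme: one pass collects the distinct first characters in first-occurrence order (dict.fromkeys), then a filtering comprehension per key rebuilds each group.
import Mathlib
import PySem

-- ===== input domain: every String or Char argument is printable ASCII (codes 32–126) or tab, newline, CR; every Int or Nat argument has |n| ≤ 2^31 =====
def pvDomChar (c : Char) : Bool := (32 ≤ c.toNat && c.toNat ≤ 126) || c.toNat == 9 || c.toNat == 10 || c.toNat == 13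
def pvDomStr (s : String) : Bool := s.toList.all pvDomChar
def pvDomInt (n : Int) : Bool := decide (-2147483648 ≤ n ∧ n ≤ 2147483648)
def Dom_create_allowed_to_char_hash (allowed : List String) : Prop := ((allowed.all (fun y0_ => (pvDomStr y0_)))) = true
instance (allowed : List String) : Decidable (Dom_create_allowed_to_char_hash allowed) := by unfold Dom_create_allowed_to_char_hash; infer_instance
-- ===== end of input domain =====

-- B groups by first character in two passes (ordered distinct keys via dict.fromkeys, then one
-- filtering pass per key) instead of A's single hash-insertion loop: an alternative decomposition.


-- shared helper: Python's `triple[0]` as a one-character string; `none` (IndexError on the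
-- empty string) is excluded by Pre_, the "" fallback is never reached inside Pre_.
def pyFirst (s : String) : String :=
  match PySem.Str.pyGet? s 0 with
  | some c => String.ofList [c]
  | none => ""

-- ===== PORT A =====
def create_allowed_to_char_hash (allowed : List String) : List (String × List String) :=
  (allowed.foldl (fun d triple =>
      let first_letter := pyFirst triple
      if d.contains first_letter then
        d.modify first_letter [] (fun l => l ++ [triple])
      else
        d.insert first_letter [triple])
    (PySem.Dict.empty : PySem.Dict String (List String))).items

-- ===== PORT B =====
def create_allowed_to_char_hash_alt (allowed : List String) : List (String × List String) :=
  let keys := PySem.List.dedup (allowed.map (fun t => pyFirst t))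
  keys.map (fun k => (k, allowed.filter (fun t => pyFirst t == k)))

-- ===== PRECONDITION & SPEC =====
-- Pre_ excludes exactly the inputs containing an empty string, on which Python A (and B) raise IndexError at triple[0].
def Pre_create_allowed_to_char_hash (allowed : List String) : Prop := ∀ s ∈ allowed, s ≠ ""
instance (allowed : List String) : Decidable (Pre_create_allowed_to_char_hash allowed) := by unfold Pre_create_allowed_to_char_hash; infer_instance
def pvWitness_create_allowed_to_char_hash : List String := ["abc", "acd", "bcd", "aef"]
def Spec_create_allowed_to_char_hash (allowed : List String) (out : List (String × List String)) : Prop := out = create_allowed_to_char_hash_alt allowed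
instance (allowed : List String) (out : List (String × List String)) : Decidable (Spec_create_allowed_to_char_hash allowed out) := by unfold Spec_create_allowed_to_char_hash; infer_instance

-- ===== CLAIM (what is proved, stated in full; the proofs are below) =====
def Claim_equal_create_allowed_to_char_hash : Prop := ∀ (allowed : List String), Dom_create_allowed_to_char_hash allowed → Pre_create_allowed_to_char_hash allowed → Spec_create_allowed_to_char_hash allowed (create_allowed_to_char_hash allowed)

-- ===== LEMMAS AND PROOFS =====

-- A's two branches are one `modify`: on an absent key, modify with default [] inserts [triple].
theorem step_eq_modify (d : PySem.Dict String (List String)) (t : String) :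
    (if d.contains (pyFirst t) then d.modify (pyFirst t) [] (fun l => l ++ [t])
     else d.insert (pyFirst t) [t])
      = d.modify (pyFirst t) [] (fun l => l ++ [t]) := by
  by_cases h : d.contains (pyFirst t)
  · simp [h]
  · have hf : d.contains (pyFirst t) = false := by simpa using h
    simp [h, PySem.Dict.modify, PySem.Dict.getD_of_not_contains d [] hf]

-- A's loop, rewritten as a fold over (key, value) pairs.
theorem loopA_eq (allowed : List String) :
    (allowed.foldl (fun d triple =>
        let first_letter := pyFirst triple
        if d.contains first_letter then
          d.modify first_letter [] (fun l => l ++ [triple])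
        else
          d.insert first_letter [triple])
      (PySem.Dict.empty : PySem.Dict String (List String)))
    = ((allowed.map (fun t => (pyFirst t, t))).foldl
        (fun d p => d.modify p.1 [] (fun l => l ++ [p.2]))
        (PySem.Dict.empty : PySem.Dict String (List String))) := by
  rw [List.foldl_map]
  exact PySem.List.foldl_congr_mem allowed _ _ _ (fun d t _ => step_eq_modify d t)

theorem create_allowed_to_char_hash_eq_alt (allowed : List String) :
    create_allowed_to_char_hash allowed = create_allowed_to_char_hash_alt allowed := by
  unfold create_allowed_to_char_hash create_allowed_to_char_hash_alt
  rw [loopA_eq]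
  set L := allowed.map (fun t => (pyFirst t, t)) with hL
  set D := L.foldl (fun (d : PySem.Dict String (List String)) (p : String × String) =>
      d.modify p.1 [] (fun l => l ++ [p.2]))
    (PySem.Dict.empty : PySem.Dict String (List String)) with hD
  have hnd : D.keys.Nodup := by
    rw [hD]
    exact PySem.Dict.nodup_keys_foldl_modify_key L (fun p => p.1)
      [] (fun d p l => l ++ [p.2]) _ PySem.Dict.nodup_keys_empty
  have hkeys : D.keys = PySem.List.dedup (allowed.map (fun t => pyFirst t)) := by
    rw [hD]
    rw [PySem.Dict.keys_foldl_modify_key]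
    simp [hL, PySem.Dict.keys_empty, List.map_map, Function.comp_def]
    rfl
  have hgetD : ∀ k, D.getD k [] = allowed.filter (fun t => pyFirst t == k) := by
    intro k
    rw [hD, PySem.Dict.getD_foldl_modify_append, PySem.Dict.getD_empty]
    simp [hL, List.filter_map, List.map_map, Function.comp_def]
  rw [PySem.Dict.items_eq_map_keys D hnd [], hkeys]
  exact List.map_congr_left (fun k _ => by rw [hgetD k])

-- ===== VERDICT (by name: the statement is the Claim_ definition above) =====
theorem create_allowed_to_char_hash_spec : Claim_equal_create_allowed_to_char_hash := by
  intro allowed _ _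
  unfold Spec_create_allowed_to_char_hash
  exact create_allowed_to_char_hash_eq_alt allowed
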